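-- pv_equiv track=rewrite | github.com/Popmaster99/AutoBoCorrect | spell_core.py | is_word_token
-- ===== SOURCE A (Python) =====
-- import unicodedata
--
-- def is_word_token(token: str) -> bool:
--     if not token:
--         return False
--
--     has_text = False
--     for char in token:
--         if char in {"'", "-"}:
--             continue
--
--         category = unicodedata.category(char)
--         if category[0] in {"L", "M", "N"}:
--             has_text = True
--             continue
--
--         return False
--
--     return has_text
-- ===== SOURCE B (Python) =====
-- import unicodedata
--
-- def is_word_token(token: str) -> bool:
--     if not token:
--         return False
--     return any(unicodedata.category(c)[0] in "LMN" for c in token) and \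
--         all(c in "'-" or unicodedata.category(c)[0] in "LMN" for c in token)
-- ===== Notes on version B (the rewrite author's own statement) =====
-- stated objective: simpler
-- what changed: Replaces the flag-accumulating early-return loop with two independent whole-token quantifier passes (any letter/mark/number present, and all chars allowed) conjoined.
import Mathlib
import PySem

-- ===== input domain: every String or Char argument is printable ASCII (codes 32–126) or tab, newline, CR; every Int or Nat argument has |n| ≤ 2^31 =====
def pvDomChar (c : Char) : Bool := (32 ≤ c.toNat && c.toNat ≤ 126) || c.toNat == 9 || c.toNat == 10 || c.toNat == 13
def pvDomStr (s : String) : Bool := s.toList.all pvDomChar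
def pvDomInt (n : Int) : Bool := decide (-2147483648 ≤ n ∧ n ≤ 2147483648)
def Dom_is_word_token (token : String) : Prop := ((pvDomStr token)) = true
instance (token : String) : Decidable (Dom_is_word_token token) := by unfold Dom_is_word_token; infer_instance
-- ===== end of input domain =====

-- B replaces A's flag-accumulating early-return loop by two independent quantifier passes (simpler decomposition).

-- ===== PORT A =====
-- unicodedata.category(c)[0] ∈ {'L','M','N'}: exact on the printable-ASCII domain, where it holds
-- precisely for the ASCII letters and digits.
def pvCatLMN (c : Char) : Bool := c.isAlpha || c.isDigit

-- the for-loop of A: early return on a disallowed char, flag has_text accumulated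
def pvLoopA : List Char → Bool → Bool
  | [], hasText => hasText
  | c :: cs, hasText =>
    if c = '\'' || c = '-' then pvLoopA cs hasText
    else if pvCatLMN c then pvLoopA cs true
    else false

def is_word_token (token : String) : Bool :=
  if token.toList.isEmpty then false
  else pvLoopA token.toList false

-- ===== PORT B =====
def is_word_token_alt (token : String) : Bool :=
  if token.toList.isEmpty then false
  else
    (token.toList.any (fun c => pvCatLMN c)) &&
    (token.toList.all (fun c => c = '\'' || c = '-' || pvCatLMN c))

-- ===== PRECONDITION & SPEC =====
def Spec_is_word_token (token : String) (out : Bool) : Prop := out = is_word_token_alt token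
instance (token : String) (out : Bool) : Decidable (Spec_is_word_token token out) := by unfold Spec_is_word_token; infer_instance

-- ===== CLAIM (what is proved, stated in full; the proofs are below) =====
def Claim_equal_is_word_token : Prop := ∀ (token : String), Dom_is_word_token token → Spec_is_word_token token (is_word_token token)

-- ===== LEMMAS AND PROOFS =====
theorem pvLoopA_eq (cs : List Char) : ∀ h : Bool,
    pvLoopA cs h =
      ((h || cs.any (fun c => pvCatLMN c)) &&
       cs.all (fun c => c = '\'' || c = '-' || pvCatLMN c)) := by
  induction cs with
  | nil => intro h; simp [pvLoopA]
  | cons c cs ih =>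
    intro h
    by_cases hq : c = '\'' || c = '-'
    · have hc : pvCatLMN c = false := by
        rcases Bool.or_eq_true_iff.mp hq with h1 | h1 <;>
          simp_all [pvCatLMN, Char.isAlpha, Char.isDigit, Char.isUpper, Char.isLower]
      simp [pvLoopA, hq, ih, hc]
    · by_cases hl : pvCatLMN c = true
      · simp [pvLoopA, hq, hl, ih]
      · simp [pvLoopA, hq, hl]

-- ===== VERDICT (by name: the statement is the Claim_ definition above) =====
theorem is_word_token_spec : Claim_equal_is_word_token := by
  intro token _
  unfold Spec_is_word_token is_word_token is_word_token_alt
  by_cases he : token.toList.isEmpty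
  · simp [he]
  · simp [he, pvLoopA_eq]
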